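-- pv_equiv track=rewrite | github.com/kammitama5/Distracting_KATAS | pillowfridgesomething.py | pillow
-- ===== SOURCE A (Python) =====
-- def pillow(s):
--     count = 0
--     first = s[0]
--     second = s[1]
--     char1 = 'n'
--     char2 = 'B'
--
--     b = [n for (n, e) in enumerate(first) if e == char1]
--     c = [m for (m, f) in enumerate(second) if f == char2]
--
--     #print b, c
--     d = b + c
--     #print d
--
--     for i in b:
--       for j in c:
--         if i == j:
--           count = count + 1
--     if count >= 1:
--       return True
--     else:
--       return False
-- ===== SOURCE B (Python) =====
-- def pillow(s):
--     first = s[0]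
--     second = s[1]
--     return any(a == 'n' and b == 'B' for a, b in zip(first, second))
-- ===== Notes on version B (the rewrite author's own statement) =====
-- stated objective: simpler
-- what changed: Replaced the two enumerate-filter index lists plus the quadratic nested count loop with one existential pass over zip(first, second).
import Mathlib
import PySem

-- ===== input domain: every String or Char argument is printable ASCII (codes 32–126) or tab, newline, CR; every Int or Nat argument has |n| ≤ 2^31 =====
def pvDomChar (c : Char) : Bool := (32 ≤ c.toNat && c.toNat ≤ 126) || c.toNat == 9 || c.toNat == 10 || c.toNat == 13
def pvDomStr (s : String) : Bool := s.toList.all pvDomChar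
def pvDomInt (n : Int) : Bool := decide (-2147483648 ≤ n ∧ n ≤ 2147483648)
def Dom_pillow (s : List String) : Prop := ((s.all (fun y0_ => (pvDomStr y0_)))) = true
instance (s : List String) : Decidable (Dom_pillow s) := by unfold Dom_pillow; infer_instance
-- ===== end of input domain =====

-- B replaces A's two index lists and nested counting loop with one existential pass over zip (objective: simpler).

-- ===== PORT A =====
def pillow (s : List String) : Bool :=
  match PySem.List.pyGet? s 0, PySem.List.pyGet? s 1 with
  | some first, some second =>
      -- b = [n for (n,e) in enumerate(first) if e == 'n']
      let b := ((PySem.List.enumerate first.toList 0).filter (fun p => p.2 == 'n')).map (·.1)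
      -- c = [m for (m,f) in enumerate(second) if f == 'B']
      let c := ((PySem.List.enumerate second.toList 0).filter (fun p => p.2 == 'B')).map (·.1)
      let _d := b ++ c
      -- nested loop counting equal indices
      let count : Nat := b.foldl (fun cnt i => c.foldl (fun cnt2 j => if i == j then cnt2 + 1 else cnt2) cnt) 0
      if count ≥ 1 then true else false
  | _, _ => false   -- Python raises IndexError here; excluded by Pre_pillow

-- ===== PORT B =====
def pillow_alt (s : List String) : Bool :=
  match PySem.List.pyGet? s 0 with
  | none => false   -- Python raises IndexError here; excluded by Pre_pillow
  | some first =>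
      match PySem.List.pyGet? s 1 with
      | none => false   -- Python raises IndexError here; excluded by Pre_pillow
      | some second =>
          (first.toList.zip second.toList).any (fun p => p.1 == 'n' && p.2 == 'B')

-- ===== PRECONDITION & SPEC =====
-- A indexes s[0] and s[1]: lists with fewer than two elements raise IndexError.
def Pre_pillow (s : List String) : Prop := 2 ≤ s.length
instance (s : List String) : Decidable (Pre_pillow s) := by unfold Pre_pillow; infer_instance
def pvWitness_pillow : List String := ["nx", "xB"]

def Spec_pillow (s : List String) (out : Bool) : Prop := out = pillow_alt s
instance (s : List String) (out : Bool) : Decidable (Spec_pillow s out) := by unfold Spec_pillow; infer_instance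

-- ===== CLAIM (what is proved, stated in full; the proofs are below) =====
def Claim_equal_pillow : Prop := ∀ (s : List String), Dom_pillow s → Pre_pillow s → Spec_pillow s (pillow s)

-- ===== LEMMAS AND PROOFS =====

-- inner loop counts occurrences of i in c
lemma inner_count (c : List Int) (i : Int) (acc : Nat) :
    c.foldl (fun cnt2 j => if i == j then cnt2 + 1 else cnt2) acc = acc + c.count i := by
  induction c generalizing acc with
  | nil => simp
  | cons x xs ih =>
      simp only [List.foldl_cons, List.count_cons, ih]
      by_cases h : i = x
      · simp [h]; omega
      · simp [h, Ne.symm h]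

-- a fold accumulating counts is positive iff some element of b lies in c
lemma sum_pos (b c : List Int) (acc : Nat) :
    1 ≤ b.foldl (fun cnt i => cnt + c.count i) acc ↔ 1 ≤ acc ∨ ∃ i ∈ b, i ∈ c := by
  induction b generalizing acc with
  | nil => simp
  | cons x xs ih =>
      simp only [List.foldl_cons, ih, List.mem_cons]
      constructor
      · rintro (h | ⟨i, hi, hic⟩)
        · by_cases hx : x ∈ c
          · exact Or.inr ⟨x, Or.inl rfl, hx⟩
          · have : c.count x = 0 := List.count_eq_zero.mpr hx
            omega
        · exact Or.inr ⟨i, Or.inr hi, hic⟩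
      · rintro (h | ⟨i, (rfl | hi), hic⟩)
        · exact Or.inl (by omega)
        · have := List.count_pos_iff.mpr hic
          exact Or.inl (by omega)
        · exact Or.inr ⟨i, hi, hic⟩

-- the nested loop of A is that counting fold
lemma nested_pos (b c : List Int) :
    1 ≤ b.foldl (fun cnt i => c.foldl (fun cnt2 j => if i == j then cnt2 + 1 else cnt2) cnt) 0 ↔
      ∃ i ∈ b, i ∈ c := by
  have hfun : (fun (cnt : Nat) (i : Int) =>
      c.foldl (fun cnt2 j => if i == j then cnt2 + 1 else cnt2) cnt) =
      (fun cnt i => cnt + c.count i) := funext fun cnt => funext fun i => inner_count c i cnt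
  rw [hfun, sum_pos]
  simp

lemma mem_indexList (f : List Char) (ch : Char) (i : Int) :
    i ∈ ((PySem.List.enumerate f 0).filter (fun p => p.2 == ch)).map (·.1) ↔
      ∃ (k : Nat) (h : k < f.length), i = (k : Int) ∧ f[k] = ch := by
  simp only [List.mem_map, List.mem_filter, PySem.List.mem_enumerate_iff]
  constructor
  · rintro ⟨⟨a, b⟩, ⟨⟨k, hk, hp⟩, hb⟩, rfl⟩
    cases hp
    simp only [beq_iff_eq] at hb
    exact ⟨k, hk, by simp, hb⟩
  · rintro ⟨k, hk, rfl, hch⟩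
    exact ⟨((k : Int), f[k]), ⟨⟨k, hk, by simp⟩, by simp [hch]⟩, rfl⟩

lemma zip_any (f g : List Char) :
    ((f.zip g).any (fun p => p.1 == 'n' && p.2 == 'B') = true) ↔
      ∃ (k : Nat), ∃ (h1 : k < f.length) (h2 : k < g.length), f[k] = 'n' ∧ g[k] = 'B' := by
  simp only [List.any_eq_true]
  constructor
  · rintro ⟨p, hp, hpred⟩
    obtain ⟨k, hk, hget⟩ := List.mem_iff_getElem.mp hp
    rw [List.length_zip] at hk
    have h1 : k < f.length := lt_of_lt_of_le hk (min_le_left _ _)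
    have h2 : k < g.length := lt_of_lt_of_le hk (min_le_right _ _)
    rw [List.getElem_zip] at hget
    subst hget
    simp only [Bool.and_eq_true, beq_iff_eq] at hpred
    exact ⟨k, h1, h2, hpred.1, hpred.2⟩
  · rintro ⟨k, h1, h2, hn, hB⟩
    refine ⟨(f[k], g[k]), ?_, by simp [hn, hB]⟩
    have hk : k < (f.zip g).length := by rw [List.length_zip]; omega
    exact List.mem_iff_getElem.mpr ⟨k, hk, by rw [List.getElem_zip]⟩

-- ===== VERDICT (by name: the statement is the Claim_ definition above) =====
theorem pillow_spec : Claim_equal_pillow := by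
  intro s _ hpre
  unfold Spec_pillow pillow pillow_alt
  match s with
  | [] => simp [Pre_pillow] at hpre
  | [x] => simp [Pre_pillow] at hpre
  | x :: y :: rest =>
      have h0 : PySem.List.pyGet? (x :: y :: rest) 0 = some x := PySem.List.pyGet?_zero_cons _ _
      have h1 : PySem.List.pyGet? (x :: y :: rest) 1 = some y := by
        have : PySem.List.pyGet? (x :: y :: rest) (((0 : Nat) : Int) + 1) = PySem.List.pyGet? (y :: rest) 0 :=
          PySem.List.pyGet?_cons_succ _ _ _
        simpa using this.trans (PySem.List.pyGet?_zero_cons _ _)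
      rw [h0, h1]
      simp only [ge_iff_le]
      by_cases hz : ((x.toList.zip y.toList).any (fun p => p.1 == 'n' && p.2 == 'B')) = true
      · rw [hz, if_pos]
        exact (nested_pos _ _).mpr (by
          obtain ⟨k, h1, h2, hn, hB⟩ := (zip_any _ _).mp hz
          exact ⟨(k : Int), (mem_indexList _ _ _).mpr ⟨k, h1, rfl, hn⟩,
                 (mem_indexList _ _ _).mpr ⟨k, h2, rfl, hB⟩⟩)
      · rw [Bool.not_eq_true] at hz
        rw [hz, if_neg]
        intro hpos
        obtain ⟨i, hib, hic⟩ := (nested_pos _ _).mp hpos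
        obtain ⟨k, hk, rfl, hn⟩ := (mem_indexList _ _ _).mp hib
        obtain ⟨m, hm, hkm, hB⟩ := (mem_indexList _ _ _).mp hic
        have : k = m := by exact_mod_cast hkm
        subst this
        have h := (zip_any _ _).mpr ⟨k, hk, hm, hn, hB⟩
        rw [hz] at h; exact absurd h (by simp)
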